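-- pv_equiv track=rewrite | github.com/ifhendryus/python | attroniNovo.py | calcula_pesos
-- ===== SOURCE A (Python) =====
-- def calcula_pesos(lista_objetos):
--
--     if len(lista_objetos) == 1:
--         nome, peso = lista_objetos[0]
--         peso_modificado = peso * 4
--         return [(nome, peso_modificado)]
--
--
--     resultado = []
--
--     for i, (nome, peso) in enumerate(lista_objetos):
--         if i == 0:
--             peso_modificado = peso * 2
--         elif i == len(lista_objetos) - 1:
--             peso_modificado = peso * 3
--         else:
--             peso_modificado = peso + resultado[i - 1][1]
--         resultado.append((nome, peso_modificado))
--
--     return resultado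
-- ===== SOURCE B (Python) =====
-- def _prefix_sums(xs):
--     sums = []
--     s = 0
--     for x in xs:
--         s = s + x
--         sums.append(s)
--     return sums
--
--
-- def calcula_pesos(lista_objetos):
--     n = len(lista_objetos)
--     if n == 0:
--         return []
--     if n == 1:
--         nome, peso = lista_objetos[0]
--         return [(nome, peso * 4)]
--     # leading part: running prefix sums of [2*p0, p1, ..., p_{n-2}], paired with the first n-1 names
--     head_pesos = [2 * lista_objetos[0][1]] + [p for _, p in lista_objetos[1:-1]]
--     out = list(zip((nm for nm, _ in lista_objetos[:-1]), _prefix_sums(head_pesos)))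
--     nome_f, peso_f = lista_objetos[-1]
--     out.append((nome_f, 3 * peso_f))
--     return out
-- ===== Notes on version B (the rewrite author's own statement) =====
-- stated objective: alternative
-- what changed: Replaces A's indexed loop that branches per position and reads resultado[i-1] back out of the output with explicit case analysis (empty / singleton / general) plus a prefix-sum pass over [2*p0, p1, ..., p_{n-2}] zipped with the leading names, with the final (name, 3*p_last) appended separately.
import Mathlib
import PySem

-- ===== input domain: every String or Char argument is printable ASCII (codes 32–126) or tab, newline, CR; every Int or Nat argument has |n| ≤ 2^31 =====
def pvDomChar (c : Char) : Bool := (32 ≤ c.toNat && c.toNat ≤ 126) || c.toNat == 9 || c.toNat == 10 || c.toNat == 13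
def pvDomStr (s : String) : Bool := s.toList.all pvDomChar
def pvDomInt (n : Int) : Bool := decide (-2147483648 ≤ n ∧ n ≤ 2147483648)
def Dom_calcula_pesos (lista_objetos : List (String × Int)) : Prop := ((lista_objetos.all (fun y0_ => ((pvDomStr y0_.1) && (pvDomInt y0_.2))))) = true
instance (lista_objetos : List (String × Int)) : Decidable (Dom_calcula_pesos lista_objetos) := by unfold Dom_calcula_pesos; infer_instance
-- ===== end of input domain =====

-- B replaces A's indexed loop (which reads resultado[i-1] back out of the output) by explicit
-- case analysis plus a prefix-sum pass zipped with the leading names; objective: alternative.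

-- ===== PORT A =====
-- the for-loop over enumerate(lista_objetos); resultado[i-1] is always in range (i = resultado.length ≥ 1),
-- so the pyGet? result is read with getD (the default is never used)
def pesosLoopA (n : Int) (res : List (String × Int)) : List (Int × (String × Int)) → List (String × Int)
  | [] => res
  | (i, (nome, peso)) :: rest =>
    let peso_modificado : Int :=
      if i = 0 then peso * 2
      else if i = n - 1 then peso * 3
      else peso + ((PySem.List.pyGet? res (i - 1)).getD ("", 0)).2
    pesosLoopA n (res ++ [(nome, peso_modificado)]) rest

def calcula_pesos (lista_objetos : List (String × Int)) : List (String × Int) :=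
  if lista_objetos.length = 1 then
    match lista_objetos with
    | (nome, peso) :: _ => [(nome, peso * 4)]
    | [] => []
  else
    pesosLoopA (lista_objetos.length : Int) [] (PySem.List.enumerate lista_objetos)

-- ===== PORT B =====
-- _prefix_sums: running sums with accumulator s
def prefixSums (s : Int) : List Int → List Int
  | [] => []
  | x :: xs => (s + x) :: prefixSums (s + x) xs

def calcula_pesos_alt (lista_objetos : List (String × Int)) : List (String × Int) :=
  match lista_objetos with
  | [] => []
  | [(nome, peso)] => [(nome, peso * 4)]
  | (nome0, peso0) :: b :: rest =>
    let head_pesos : List Int := 2 * peso0 :: ((b :: rest).dropLast.map Prod.snd)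
    let out := List.zip (((nome0, peso0) :: b :: rest).dropLast.map Prod.fst) (prefixSums 0 head_pesos)
    let fin := rest.getLastD b
    out ++ [(fin.1, 3 * fin.2)]

-- ===== PRECONDITION & SPEC =====
def Spec_calcula_pesos (lista_objetos : List (String × Int)) (out : List (String × Int)) : Prop := out = calcula_pesos_alt lista_objetos
instance (lista_objetos : List (String × Int)) (out : List (String × Int)) : Decidable (Spec_calcula_pesos lista_objetos out) := by unfold Spec_calcula_pesos; infer_instance

-- ===== CLAIM (what is proved, stated in full; the proofs are below) =====
def Claim_equal_calcula_pesos : Prop := ∀ (lista_objetos : List (String × Int)), Dom_calcula_pesos lista_objetos → Spec_calcula_pesos lista_objetos (calcula_pesos lista_objetos)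


-- ===== LEMMAS AND PROOFS =====

theorem pesosLoopA_nil (n : Int) (res : List (String × Int)) : pesosLoopA n res [] = res := rfl

theorem pesosLoopA_cons (n i : Int) (res : List (String × Int)) (nome : String) (peso : Int)
    (rest : List (Int × (String × Int))) :
    pesosLoopA n res ((i, (nome, peso)) :: rest) =
      pesosLoopA n (res ++ [(nome,
        if i = 0 then peso * 2
        else if i = n - 1 then peso * 3
        else peso + ((PySem.List.pyGet? res (i - 1)).getD ("", 0)).2)]) rest := rfl

-- reading res[len res - 1] is reading the last element
theorem pyGet_last (res : List (String × Int)) (x : String × Int) (h : res.getLast? = some x) :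
    PySem.List.pyGet? res ((res.length : Int) - 1) = some x := by
  rcases List.eq_nil_or_concat res with rfl | ⟨pre, y, rfl⟩
  · simp at h
  · simp only [List.concat_eq_append] at h ⊢
    have hl : ((pre ++ [y]).length : Int) - 1 = (pre.length : Int) := by simp
    rw [hl, PySem.List.pyGet?_append_length]
    simp at h
    simp [h]

-- main loop invariant: past the first element, A's loop computes running prefix sums of the
-- remaining pesos, except the last element, whose peso is tripled
theorem pesosLoopA_inv (ys : List (String × Int)) :
    ∀ (n : Int) (res : List (String × Int)) (nm : String) (s : Int),
    ys ≠ [] →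
    res.getLast? = some (nm, s) →
    (res.length : Int) + (ys.length : Int) = n →
    1 ≤ (res.length : Int) →
    pesosLoopA n res (PySem.List.enumerate ys (res.length : Int)) =
      res ++ List.zip (ys.dropLast.map Prod.fst) (prefixSums s (ys.dropLast.map Prod.snd))
          ++ [((ys.getLastD (nm, s)).1, 3 * (ys.getLastD (nm, s)).2)] := by
  induction ys with
  | nil => intro n res nm s hne; exact absurd rfl hne
  | cons y ys ih =>
    intro n res nm s _ hlast hn hpos
    rcases y with ⟨ynm, yp⟩
    cases ys with
    | nil =>
      -- y is the last element: i = res.length = n - 1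
      have hi0 : ¬ ((res.length : Int) = 0) := by omega
      have hiN : (res.length : Int) = n - 1 := by simp at hn; omega
      rw [PySem.List.enumerate_cons, pesosLoopA_cons, if_neg hi0, if_pos hiN,
        PySem.List.enumerate_nil, pesosLoopA_nil]
      simp [mul_comm]
    | cons z zs =>
      -- y is a middle element: i = res.length, 1 ≤ i < n - 1
      have hi0 : ¬ ((res.length : Int) = 0) := by omega
      have hiN : ¬ ((res.length : Int) = n - 1) := by simp at hn ⊢; omega
      rw [PySem.List.enumerate_cons, pesosLoopA_cons, if_neg hi0, if_neg hiN,
        pyGet_last res _ hlast]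
      simp only [Option.getD_some]
      have hlen : ((res ++ [(ynm, yp + s)]).length : Int) = (res.length : Int) + 1 := by simp
      have hrec := ih n (res ++ [(ynm, yp + s)]) ynm (yp + s) (by simp)
        (by simp) (by simp at hn ⊢; omega) (by simp)
      rw [hlen] at hrec
      rw [hrec]
      have hadd : s + yp = yp + s := by ring
      simp [prefixSums, hadd, List.getLast?_cons]

-- ===== VERDICT (by name: the statement is the Claim_ definition above) =====
theorem calcula_pesos_spec : Claim_equal_calcula_pesos := by
  intro lista _
  show calcula_pesos lista = calcula_pesos_alt lista
  match lista with
  | [] => decide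
  | [(nome, peso)] => simp [calcula_pesos, calcula_pesos_alt]
  | (nome0, peso0) :: b :: rest =>
    have hlen : ¬ (((nome0, peso0) :: b :: rest).length = 1) := by simp
    simp only [calcula_pesos]
    rw [if_neg hlen, PySem.List.enumerate_cons, pesosLoopA_cons, if_pos rfl,
      List.nil_append]
    have h01 : (0 : Int) + 1 = (([(nome0, peso0 * 2)] : List (String × Int)).length : Int) := by
      simp
    rw [h01, pesosLoopA_inv (b :: rest) _ [(nome0, peso0 * 2)] nome0 (peso0 * 2)
      (by simp) (by simp) (by simp; omega) (by simp)]
    have hm : 0 + 2 * peso0 = peso0 * 2 := by ring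
    simp [calcula_pesos_alt, prefixSums, hm, List.getLast?_cons]
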